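-- pv_equiv track=rewrite | github.com/Pathce/CodingTest_Python | Synapsoft/test/SynapsoftQuiz.py | Solution
-- ===== SOURCE A (Python) =====
-- def Research(num_list, current_room, line, target):
--     result = []
--     line_h = line - current_room[0]
--     line_v = line - current_room[1]
--     list_v = []
--
--     for v in range(line_v):
--         list_h = []
--         list_v.append(num_list[current_room[0]][current_room[1]+v])
--         if sum(list_v) >= target:
--             if sum(list_v) == target:
--                 result.append(list_v)
--             break
--         else:
--             for h in range(line_h - 1):
--                 list_h.append(num_list[current_room[0]+1+h][current_room[1]+v])
--                 if sum(list_v) + sum(list_h) >= target: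
--                     if sum(list_v) + sum(list_h) == target:
--                         list_r = list_v + list_h
--                         result.append(list_r)
--                     break
--
--     list_h = []
--     for h in range(line_h):
--         list_v = []
--         list_h.append(num_list[current_room[0]+h][current_room[1]])
--         if sum(list_h) >= target:
--             if sum(list_h) == target:
--                 result.append(list_h)
--             break
--         else:
--             for v in range(line_v - 1):
--                 list_v.append(num_list[current_room[0]+h][current_room[1]+1+v])
--                 if sum(list_h) + sum(list_v) >= target:
--                     if sum(list_h) + sum(list_v) == target:
--                         list_r = list_h + list_v
--                         result.append(list_r)
--                     break
--
--     return result
--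
-- def Solution(num_rooms):
--     line = num_rooms[0][0]      # N*N 배열의 N
--     target = num_rooms[1][0]    # 목표 숫자
--     num_list = num_rooms[2:]    # 1, 2번 라인을 제외한 리스트
--     current_room = [0, 0]       # 현재 탐색중인 위치를 표시할 리스트
--     answer = []
--
--     for list_v in num_list:
--         current_room[1] = 0
--         for num in list_v:
--             research_result = Research(num_list, current_room, line, target)
--             if research_result != [[]]:
--                 for i in research_result:
--                     answer.append(i)
--             current_room[1] += 1
--         current_room[0] += 1
--
--     return answer
-- ===== SOURCE B (Python) =====
-- from itertools import accumulate
--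
-- def _bend(prefix_cells, base, arm, target):
--     # first j where base + sum(arm[:j+1]) >= target; emit a path only on exact hit
--     j = next((j for j, s in enumerate(accumulate(arm)) if base + s >= target), None)
--     if j is not None and base + sum(arm[:j + 1]) == target:
--         return [prefix_cells + arm[:j + 1]]
--     return []
--
-- def _arm_paths(primary, secondary_at, target):
--     sums = list(accumulate(primary))
--     stop = next((i for i, s in enumerate(sums) if s >= target), len(sums))
--     paths = []
--     for k in range(stop):
--         paths += _bend(primary[:k + 1], sums[k], secondary_at(k), target)
--     if stop < len(sums) and sums[stop] == target:
--         paths.append(primary[:stop + 1])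
--     return paths
--
-- def Solution(num_rooms):
--     line = num_rooms[0][0]
--     target = num_rooms[1][0]
--     grid = num_rooms[2:]
--     answer = []
--     for r in range(len(grid)):
--         for c in range(len(grid[r])):
--             right = [grid[r][c + v] for v in range(line - c)]
--             down = [grid[r + h][c] for h in range(line - r)]
--             answer += _arm_paths(right, lambda k: [grid[r + 1 + h][c + k] for h in range(line - r - 1)], target)
--             answer += _arm_paths(down, lambda k: [grid[r + k][c + 1 + v] for v in range(line - c - 1)], target)
--     return answer
-- ===== Notes on version B (the rewrite author's own statement) =====
-- stated objective: alternative
-- what changed: Per cell, B materialises each arm once, computes its prefix sums with itertools.accumulate and locates the break point / exact hit by a single first-hit scan, instead of A's nested break-driven loops that re-run sum() over the growing path lists at every step; B trades A's lazy early-break reads for eager arm construction, so it is not faster when scans break early.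
-- outside the precondition, e.g. on Solution([[2], [1], [5]]): A returns [], B raises IndexError
import Mathlib
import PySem

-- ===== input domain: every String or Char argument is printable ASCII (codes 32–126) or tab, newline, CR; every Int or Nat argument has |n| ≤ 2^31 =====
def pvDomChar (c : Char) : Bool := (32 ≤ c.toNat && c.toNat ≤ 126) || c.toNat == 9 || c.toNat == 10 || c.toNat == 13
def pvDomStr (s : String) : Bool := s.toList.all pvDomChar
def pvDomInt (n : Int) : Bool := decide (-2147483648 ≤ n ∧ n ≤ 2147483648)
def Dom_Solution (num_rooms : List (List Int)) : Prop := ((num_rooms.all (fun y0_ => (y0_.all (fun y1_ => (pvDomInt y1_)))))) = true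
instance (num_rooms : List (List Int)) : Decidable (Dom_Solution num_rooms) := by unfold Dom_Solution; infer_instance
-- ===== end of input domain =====

-- B restates each cell's search as: materialise the arm, take its prefix sums once (itertools.accumulate)
-- and find the first hit by a single scan — instead of A's nested break-driven loops re-running sum();
-- same return value on every input admitted by Pre_Solution.

-- grid[i][j] with a default: exact wherever Pre_Solution guarantees the Python indexing is in range
def pvCell (g : List (List Int)) (i j : Int) : Int :=
  PySem.List.pyGetD (PySem.List.pyGetD g i []) j 0

-- ===== PORT A =====
-- first loop of Research, inner 'for h in range(line_h - 1)' (state: list_h; returns the appended results)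
def Research_inner1 (g : List (List Int)) (r0 c0 v target : Int) (list_v : List Int) :
    List Int → List Int → List (List Int)
  | [], _ => []
  | h :: hs, list_h =>
    let list_h' := list_h ++ [pvCell g (r0 + 1 + h) (c0 + v)]
    if target ≤ list_v.sum + list_h'.sum then
      if list_v.sum + list_h'.sum = target then [list_v ++ list_h'] else []
    else Research_inner1 g r0 c0 v target list_v hs list_h'

-- first loop of Research, 'for v in range(line_v)' (state: list_v; break realised by not recursing)
def Research_outer1 (g : List (List Int)) (r0 c0 line target : Int) :
    List Int → List Int → List (List Int)
  | [], _ => []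
  | v :: vs, list_v =>
    let list_v' := list_v ++ [pvCell g r0 (c0 + v)]
    if target ≤ list_v'.sum then
      if list_v'.sum = target then [list_v'] else []
    else
      Research_inner1 g r0 c0 v target list_v' (PySem.List.pyRange 0 (line - r0 - 1) 1) [] ++
        Research_outer1 g r0 c0 line target vs list_v'

-- second loop of Research, inner 'for v in range(line_v - 1)'
def Research_inner2 (g : List (List Int)) (r0 c0 h target : Int) (list_h : List Int) :
    List Int → List Int → List (List Int)
  | [], _ => []
  | v :: vs, list_v =>
    let list_v' := list_v ++ [pvCell g (r0 + h) (c0 + 1 + v)]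
    if target ≤ list_h.sum + list_v'.sum then
      if list_h.sum + list_v'.sum = target then [list_h ++ list_v'] else []
    else Research_inner2 g r0 c0 h target list_h vs list_v'

-- second loop of Research, 'for h in range(line_h)'
def Research_outer2 (g : List (List Int)) (r0 c0 line target : Int) :
    List Int → List Int → List (List Int)
  | [], _ => []
  | h :: hs, list_h =>
    let list_h' := list_h ++ [pvCell g (r0 + h) c0]
    if target ≤ list_h'.sum then
      if list_h'.sum = target then [list_h'] else []
    else
      Research_inner2 g r0 c0 h target list_h' (PySem.List.pyRange 0 (line - c0 - 1) 1) [] ++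
        Research_outer2 g r0 c0 line target hs list_h'

def Research (g : List (List Int)) (r0 c0 line target : Int) : List (List Int) :=
  Research_outer1 g r0 c0 line target (PySem.List.pyRange 0 (line - c0) 1) [] ++
    Research_outer2 g r0 c0 line target (PySem.List.pyRange 0 (line - r0) 1) []

-- 'for num in list_v' of Solution (only the counter current_room[1] is used)
def solLoopC (g : List (List Int)) (line target r0 : Int) : List Int → Int → List (List Int)
  | [], _ => []
  | _ :: nums, c0 =>
    let res := Research g r0 c0 line target
    (if res ≠ [[]] then res else []) ++ solLoopC g line target r0 nums (c0 + 1)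

-- 'for list_v in num_list' of Solution
def solLoopR (g : List (List Int)) (line target : Int) : List (List Int) → Int → List (List Int)
  | [], _ => []
  | row :: rows, r0 => solLoopC g line target r0 row 0 ++ solLoopR g line target rows (r0 + 1)

def Solution (num_rooms : List (List Int)) : List (List Int) :=
  let line := pvCell num_rooms 0 0
  let target := pvCell num_rooms 1 0
  let g := PySem.List.slice num_rooms (some 2) none
  solLoopR g line target g 0

-- ===== PORT B =====
-- port of itertools.accumulate (running totals)
def accumulateB (acc : Int) : List Int → List Int
  | [] => []
  | x :: xs => (acc + x) :: accumulateB (acc + x) xs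

-- port of _bend
def bendB (prefixCells : List Int) (base : Int) (arm : List Int) (target : Int) : List (List Int) :=
  let asums := accumulateB 0 arm
  let j := asums.findIdx (fun s => target ≤ base + s)
  if j < asums.length then
    if base + (arm.take (j + 1)).sum = target then [prefixCells ++ arm.take (j + 1)] else []
  else []

-- port of _arm_paths
def armPathsB (primary : List Int) (secondaryAt : Nat → List Int) (target : Int) : List (List Int) :=
  let sums := accumulateB 0 primary
  let stop := sums.findIdx (fun s => target ≤ s)
  (List.range stop).flatMap
      (fun k => bendB (primary.take (k + 1)) (sums.getD k 0) (secondaryAt k) target) ++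
    (if stop < sums.length ∧ sums.getD stop 0 = target then [primary.take (stop + 1)] else [])

def Solution_alt (num_rooms : List (List Int)) : List (List Int) :=
  let line := pvCell num_rooms 0 0
  let target := pvCell num_rooms 1 0
  let g := PySem.List.slice num_rooms (some 2) none
  (List.range g.length).flatMap (fun r : Nat =>
    (List.range (g.getD r []).length).flatMap (fun c : Nat =>
      let right := (PySem.List.pyRange 0 (line - (c : Int)) 1).map
        (fun v => pvCell g (r : Int) ((c : Int) + v))
      let down := (PySem.List.pyRange 0 (line - (r : Int)) 1).map
        (fun h => pvCell g ((r : Int) + h) (c : Int))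
      armPathsB right
          (fun k => (PySem.List.pyRange 0 (line - (r : Int) - 1) 1).map
            (fun h => pvCell g ((r : Int) + 1 + h) ((c : Int) + (k : Int)))) target ++
        armPathsB down
          (fun k => (PySem.List.pyRange 0 (line - (c : Int) - 1) 1).map
            (fun v => pvCell g ((r : Int) + (k : Int)) ((c : Int) + 1 + v))) target))

-- ===== PRECONDITION & SPEC =====
-- Pre_ excludes inputs on which Python A raises IndexError (fewer than two header rows, an empty
-- header row, or a positive line with a grid smaller than line×line or with ragged rows); on such a
-- too-small grid A sometimes still returns (an early break hides the bad index) — those accidental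
-- returns are excluded too, since B reads whole arms up front and raises there.
def Pre_Solution (num_rooms : List (List Int)) : Prop :=
  2 ≤ num_rooms.length ∧ num_rooms.getD 0 [] ≠ [] ∧ num_rooms.getD 1 [] ≠ [] ∧
    ((num_rooms.getD 0 []).getD 0 0 ≤ 0 ∨ num_rooms.drop 2 = [] ∨
      ((num_rooms.getD 0 []).getD 0 0 ≤ ((num_rooms.drop 2).length : Int) ∧
        ∀ row ∈ num_rooms.drop 2,
          (num_rooms.getD 0 []).getD 0 0 ≤ (row.length : Int) ∧
            row.length = ((num_rooms.drop 2).getD 0 []).length))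
instance (num_rooms : List (List Int)) : Decidable (Pre_Solution num_rooms) := by
  unfold Pre_Solution; infer_instance

def pvWitness_Solution : List (List Int) := [[2], [3], [1, 2], [2, 1]]

def Spec_Solution (num_rooms : List (List Int)) (out : List (List Int)) : Prop := out = Solution_alt num_rooms
instance (num_rooms : List (List Int)) (out : List (List Int)) : Decidable (Spec_Solution num_rooms out) := by unfold Spec_Solution; infer_instance

-- ===== CLAIM (what is proved, stated in full; the proofs are below) =====
def Claim_equal_Solution : Prop := ∀ (num_rooms : List (List Int)), Dom_Solution num_rooms → Pre_Solution num_rooms → Spec_Solution num_rooms (Solution num_rooms)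

-- ===== LEMMAS AND PROOFS =====
-- (the two ports agree on ALL inputs, because both read cells through the defaulted getter pvCell;
--  Pre_Solution marks where that getter — hence each port — is exact for its Python)

-- middle form shared by the per-arm proofs: the scan over (value, bend-arm) pairs
def pvMid (t : Int) : List Int → Int → List (Int × List Int) → List (List Int)
  | _, _, [] => []
  | pref, base, (x, arm) :: ps =>
    if t ≤ base + x then
      if base + x = t then [pref ++ [x]] else []
    else bendB (pref ++ [x]) (base + x) arm t ++ pvMid t (pref ++ [x]) (base + x) ps

def pvPairs (sec : Nat → List Int) : Nat → List Int → List (Int × List Int)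
  | _, [] => []
  | off, x :: xs => (x, sec off) :: pvPairs sec (off + 1) xs

theorem accum_shift (a : Int) : ∀ (b : Int) (l : List Int),
    accumulateB (a + b) l = (accumulateB b l).map (a + ·) := by
  intro b l
  induction l generalizing b with
  | nil => simp [accumulateB]
  | cons x xs ih => simp [accumulateB, add_assoc, ih (b + x)]

theorem accum_shift0 (a : Int) (l : List Int) :
    accumulateB a l = (accumulateB 0 l).map (a + ·) := by
  simpa using accum_shift a 0 l

theorem bendB_cons (p : List Int) (b x t : Int) (xs : List Int) :
    bendB p b (x :: xs) t =
      if t ≤ b + x then (if b + x = t then [p ++ [x]] else [])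
      else bendB (p ++ [x]) (b + x) xs t := by
  by_cases hbx : t ≤ b + x
  · simp only [bendB, accumulateB, if_pos hbx]
    rw [List.findIdx_cons]
    simp [hbx]
  · simp only [bendB, accumulateB, zero_add]
    rw [List.findIdx_cons]
    have : (decide (t ≤ b + x)) = false := by simp [hbx]
    rw [this]
    simp only [cond_false]
    rw [accum_shift0 x xs, List.findIdx_map]
    have hfun : ((fun s => decide (t ≤ b + s)) ∘ (x + ·)) = (fun s => decide (t ≤ b + x + s)) := by
      funext s; simp [add_assoc]
    rw [hfun]
    set j := List.findIdx (fun s => decide (t ≤ b + x + s)) (accumulateB 0 xs) with hj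
    simp only [List.length_map, List.length_cons]
    rw [if_neg hbx]
    by_cases hlt : j < (accumulateB 0 xs).length
    · rw [if_pos (by omega)]
      have htake : (x :: xs).take (j + 1 + 1) = x :: xs.take (j + 1) := rfl
      rw [htake]
      simp only [if_pos hlt]
      have h1 : b + (x :: xs.take (j + 1)).sum = b + x + (xs.take (j + 1)).sum := by
        simp [add_assoc]
      have h2 : p ++ x :: xs.take (j + 1) = p ++ [x] ++ xs.take (j + 1) := by
        simp
      rw [h1, h2]
    · rw [if_neg (by omega)]
      simp only [if_neg hlt]

theorem bendB_nil (p : List Int) (b t : Int) : bendB p b [] t = [] := by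
  simp [bendB, accumulateB]

theorem armGen_eq (t : Int) : ∀ (primary pref : List Int) (base : Int)
    (sec : Nat → List Int) (off : Nat),
    ((List.range ((accumulateB base primary).findIdx (fun s => t ≤ s))).flatMap
        (fun k => bendB (pref ++ primary.take (k + 1)) ((accumulateB base primary).getD k 0)
          (sec (off + k)) t) ++
      (if (accumulateB base primary).findIdx (fun s => t ≤ s) < (accumulateB base primary).length ∧
          (accumulateB base primary).getD ((accumulateB base primary).findIdx (fun s => t ≤ s)) 0 = t
        then [pref ++ primary.take ((accumulateB base primary).findIdx (fun s => t ≤ s) + 1)]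
        else []))
    = pvMid t pref base (pvPairs sec off primary) := by
  intro primary
  induction primary with
  | nil => intro pref base sec off; simp [accumulateB, pvPairs, pvMid]
  | cons x xs ih =>
    intro pref base sec off
    simp only [accumulateB, pvPairs, pvMid]
    rw [List.findIdx_cons]
    by_cases hbx : t ≤ base + x
    · have : (decide (t ≤ base + x)) = true := by simp [hbx]
      rw [this]
      simp only [cond_true, List.range_zero, List.flatMap_nil, List.nil_append,
        List.length_cons, List.getD]
      rw [if_pos hbx]
      simp
    · have : (decide (t ≤ base + x)) = false := by simp [hbx]
      rw [this]
      simp only [cond_false, if_neg hbx]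
      set j := (accumulateB (base + x) xs).findIdx (fun s => t ≤ s) with hj
      rw [List.range_succ_eq_map, List.flatMap_cons, List.flatMap_map,
        ← ih (pref ++ [x]) (base + x) sec (off + 1)]
      have hf0 : bendB (pref ++ (x :: xs).take (0 + 1))
          (((base + x) :: accumulateB (base + x) xs).getD 0 0) (sec (off + 0)) t
          = bendB (pref ++ [x]) (base + x) (sec off) t := rfl
      rw [List.append_assoc, hf0]
      have hfun : (fun a : Nat =>
            bendB (pref ++ List.take (a.succ + 1) (x :: xs))
              (((base + x) :: accumulateB (base + x) xs).getD a.succ 0) (sec (off + a.succ)) t)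
          = (fun k : Nat => bendB (pref ++ [x] ++ List.take (k + 1) xs)
              ((accumulateB (base + x) xs).getD k 0) (sec (off + 1 + k)) t) := by
        funext k
        simp only [Nat.succ_eq_add_one, List.take_succ_cons, List.getD_cons_succ]
        have h2 : pref ++ x :: xs.take (k + 1) = pref ++ [x] ++ xs.take (k + 1) := by simp
        have h3 : off + (k + 1) = off + 1 + k := by omega
        rw [h2, h3]
      congr 1
      rw [← hj, hfun]
      congr 1
      simp only [List.length_cons, List.getD_cons_succ, List.take_succ_cons,
        Nat.add_lt_add_iff_right]
      have h2 : pref ++ x :: xs.take (j + 1) = pref ++ [x] ++ xs.take (j + 1) := by simp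
      rw [h2]

theorem armPathsB_eq (primary : List Int) (sec : Nat → List Int) (t : Int) :
    armPathsB primary sec t = pvMid t [] 0 (pvPairs sec 0 primary) := by
  have h := armGen_eq t primary [] 0 sec 0
  simpa [armPathsB] using h

theorem inner1_eq (g : List (List Int)) (r0 c0 v t : Int) :
    ∀ (rng lv lh : List Int),
    Research_inner1 g r0 c0 v t lv rng lh
      = bendB (lv ++ lh) (lv.sum + lh.sum) (rng.map (fun h => pvCell g (r0 + 1 + h) (c0 + v))) t := by
  intro rng
  induction rng with
  | nil => intro lv lh; simp [Research_inner1, bendB_nil]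
  | cons h hs ih =>
    intro lv lh
    simp only [Research_inner1, List.map_cons]
    rw [bendB_cons]
    have hsum : lv.sum + (lh ++ [pvCell g (r0 + 1 + h) (c0 + v)]).sum
        = lv.sum + lh.sum + pvCell g (r0 + 1 + h) (c0 + v) := by
      simp [add_assoc]
    have happ : lv ++ (lh ++ [pvCell g (r0 + 1 + h) (c0 + v)])
        = (lv ++ lh) ++ [pvCell g (r0 + 1 + h) (c0 + v)] := by simp
    by_cases hc : t ≤ lv.sum + lh.sum + pvCell g (r0 + 1 + h) (c0 + v)
    · rw [if_pos (by rw [hsum]; exact hc), if_pos hc]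
      by_cases he : lv.sum + lh.sum + pvCell g (r0 + 1 + h) (c0 + v) = t
      · rw [if_pos (by rw [hsum]; exact he), if_pos he, happ]
      · rw [if_neg (by rw [hsum]; exact he), if_neg he]
    · rw [if_neg (by rw [hsum]; exact hc), if_neg hc, ih lv (lh ++ [pvCell g (r0 + 1 + h) (c0 + v)])]
      rw [hsum, happ]

theorem inner2_eq (g : List (List Int)) (r0 c0 h0 t : Int) :
    ∀ (rng lh lv : List Int),
    Research_inner2 g r0 c0 h0 t lh rng lv
      = bendB (lh ++ lv) (lh.sum + lv.sum) (rng.map (fun v => pvCell g (r0 + h0) (c0 + 1 + v))) t := by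
  intro rng
  induction rng with
  | nil => intro lh lv; simp [Research_inner2, bendB_nil]
  | cons v vs ih =>
    intro lh lv
    simp only [Research_inner2, List.map_cons]
    rw [bendB_cons]
    have hsum : lh.sum + (lv ++ [pvCell g (r0 + h0) (c0 + 1 + v)]).sum
        = lh.sum + lv.sum + pvCell g (r0 + h0) (c0 + 1 + v) := by
      simp [add_assoc]
    have happ : lh ++ (lv ++ [pvCell g (r0 + h0) (c0 + 1 + v)])
        = (lh ++ lv) ++ [pvCell g (r0 + h0) (c0 + 1 + v)] := by simp
    by_cases hc : t ≤ lh.sum + lv.sum + pvCell g (r0 + h0) (c0 + 1 + v)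
    · rw [if_pos (by rw [hsum]; exact hc), if_pos hc]
      by_cases he : lh.sum + lv.sum + pvCell g (r0 + h0) (c0 + 1 + v) = t
      · rw [if_pos (by rw [hsum]; exact he), if_pos he, happ]
      · rw [if_neg (by rw [hsum]; exact he), if_neg he]
    · rw [if_neg (by rw [hsum]; exact hc), if_neg hc, ih lh (lv ++ [pvCell g (r0 + h0) (c0 + 1 + v)])]
      rw [hsum, happ]

theorem outer1_eq (g : List (List Int)) (r0 c0 line t : Int) :
    ∀ (ks : List Nat) (lv : List Int),
    Research_outer1 g r0 c0 line t (ks.map (fun k : Nat => (k : Int))) lv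
      = pvMid t lv lv.sum (ks.map (fun k : Nat =>
          (pvCell g r0 (c0 + (k : Int)),
           (PySem.List.pyRange 0 (line - r0 - 1) 1).map
             (fun h => pvCell g (r0 + 1 + h) (c0 + (k : Int)))))) := by
  intro ks
  induction ks with
  | nil => intro lv; simp [Research_outer1, pvMid]
  | cons k ks ih =>
    intro lv
    simp only [Research_outer1, List.map_cons, pvMid]
    have hsum : (lv ++ [pvCell g r0 (c0 + (k : Int))]).sum = lv.sum + pvCell g r0 (c0 + (k : Int)) := by
      simp
    by_cases hc : t ≤ lv.sum + pvCell g r0 (c0 + (k : Int))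
    · rw [if_pos (by rw [hsum]; exact hc), if_pos hc]
      by_cases he : lv.sum + pvCell g r0 (c0 + (k : Int)) = t
      · rw [if_pos (by rw [hsum]; exact he), if_pos he]
      · rw [if_neg (by rw [hsum]; exact he), if_neg he]
    · rw [if_neg (by rw [hsum]; exact hc), if_neg hc]
      rw [ih (lv ++ [pvCell g r0 (c0 + (k : Int))]),
        inner1_eq g r0 c0 (k : Int) t _ (lv ++ [pvCell g r0 (c0 + (k : Int))]) []]
      simp [hsum]

theorem outer2_eq (g : List (List Int)) (r0 c0 line t : Int) :
    ∀ (ks : List Nat) (lh : List Int),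
    Research_outer2 g r0 c0 line t (ks.map (fun k : Nat => (k : Int))) lh
      = pvMid t lh lh.sum (ks.map (fun k : Nat =>
          (pvCell g (r0 + (k : Int)) c0,
           (PySem.List.pyRange 0 (line - c0 - 1) 1).map
             (fun v => pvCell g (r0 + (k : Int)) (c0 + 1 + v))))) := by
  intro ks
  induction ks with
  | nil => intro lh; simp [Research_outer2, pvMid]
  | cons k ks ih =>
    intro lh
    simp only [Research_outer2, List.map_cons, pvMid]
    have hsum : (lh ++ [pvCell g (r0 + (k : Int)) c0]).sum = lh.sum + pvCell g (r0 + (k : Int)) c0 := by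
      simp
    by_cases hc : t ≤ lh.sum + pvCell g (r0 + (k : Int)) c0
    · rw [if_pos (by rw [hsum]; exact hc), if_pos hc]
      by_cases he : lh.sum + pvCell g (r0 + (k : Int)) c0 = t
      · rw [if_pos (by rw [hsum]; exact he), if_pos he]
      · rw [if_neg (by rw [hsum]; exact he), if_neg he]
    · rw [if_neg (by rw [hsum]; exact hc), if_neg hc]
      rw [ih (lh ++ [pvCell g (r0 + (k : Int)) c0]),
        inner2_eq g r0 c0 (k : Int) t _ (lh ++ [pvCell g (r0 + (k : Int)) c0]) []]
      simp [hsum]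

theorem pvPairs_map_range (sec : Nat → List Int) (val : Nat → Int) :
    ∀ (n off : Nat), pvPairs sec off ((List.range' off n).map val)
      = (List.range' off n).map (fun k => (val k, sec k)) := by
  intro n
  induction n with
  | zero => intro off; simp [pvPairs]
  | succ n ih => intro off; simp [List.range'_succ, pvPairs, ih (off + 1)]

theorem bendB_ne (p : List Int) (b t : Int) (arm : List Int) (hp : p ≠ []) :
    ([] : List Int) ∉ bendB p b arm t := by
  simp only [bendB]
  split_ifs with h1 h2 <;> simp_all

theorem pvMid_ne (t : Int) : ∀ (ps : List (Int × List Int)) (pref : List Int) (base : Int),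
    ([] : List Int) ∉ pvMid t pref base ps := by
  intro ps
  induction ps with
  | nil => intro pref base; simp [pvMid]
  | cons p ps ih =>
    intro pref base
    obtain ⟨x, arm⟩ := p
    simp only [pvMid]
    split
    · split <;> simp
    · intro hmem
      rcases List.mem_append.1 hmem with h | h
      · exact bendB_ne _ _ _ _ (by simp) h
      · exact ih _ _ h

theorem pyR (m : Int) : PySem.List.pyRange 0 m 1
    = (List.range m.toNat).map (fun k : Nat => (k : Int)) := by
  simpa using PySem.List.pyRange_one 0 m

-- B's per-cell contribution (literally the body of Solution_alt's inner lambda)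
def cellTermB (g : List (List Int)) (line t : Int) (r c : Nat) : List (List Int) :=
  let right := (PySem.List.pyRange 0 (line - (c : Int)) 1).map
    (fun v => pvCell g (r : Int) ((c : Int) + v))
  let down := (PySem.List.pyRange 0 (line - (r : Int)) 1).map
    (fun h => pvCell g ((r : Int) + h) (c : Int))
  armPathsB right
      (fun k => (PySem.List.pyRange 0 (line - (r : Int) - 1) 1).map
        (fun h => pvCell g ((r : Int) + 1 + h) ((c : Int) + (k : Int)))) t ++
    armPathsB down
      (fun k => (PySem.List.pyRange 0 (line - (c : Int) - 1) 1).map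
        (fun v => pvCell g ((r : Int) + (k : Int)) ((c : Int) + 1 + v))) t

theorem cell_eq (g : List (List Int)) (line t : Int) (r c : Nat) :
    Research g (r : Int) (c : Int) line t = cellTermB g line t r c := by
  unfold Research cellTermB
  congr 1
  · rw [pyR (line - (c : Int)), outer1_eq, armPathsB_eq, List.map_map,
      List.range_eq_range', pvPairs_map_range]
    simp [Function.comp]
  · rw [pyR (line - (r : Int)), outer2_eq, armPathsB_eq, List.map_map,
      List.range_eq_range', pvPairs_map_range]
    simp [Function.comp]

theorem research_ne (g : List (List Int)) (line t : Int) (r c : Nat) :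
    Research g (r : Int) (c : Int) line t ≠ [[]] := by
  intro h
  have h0 : ([] : List Int) ∈ Research g (r : Int) (c : Int) line t := by
    rw [h]; exact List.mem_cons_self
  rw [cell_eq] at h0
  unfold cellTermB at h0
  rcases List.mem_append.1 h0 with h1 | h1 <;>
    · rw [armPathsB_eq] at h1
      exact pvMid_ne _ _ _ _ h1

theorem loopC_eq (g : List (List Int)) (line t : Int) (r : Nat) :
    ∀ (row : List Int) (c : Nat),
    solLoopC g line t (r : Int) row (c : Int)
      = (List.range' c row.length).flatMap (fun cc => cellTermB g line t r cc) := by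
  intro row
  induction row with
  | nil => intro c; simp [solLoopC]
  | cons x xs ih =>
    intro c
    simp only [solLoopC, List.length_cons, List.range'_succ, List.flatMap_cons]
    rw [if_pos (research_ne g line t r c), cell_eq]
    congr 1
    have : ((c : Int) + 1) = ((c + 1 : Nat) : Int) := by push_cast; ring
    rw [this, ih (c + 1)]

theorem loopR_eq (g : List (List Int)) (line t : Int) :
    ∀ (rows : List (List Int)) (r : Nat), g.drop r = rows →
    solLoopR g line t rows (r : Int)
      = (List.range' r rows.length).flatMap
          (fun rr => (List.range (g.getD rr []).length).flatMap (cellTermB g line t rr)) := by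
  intro rows
  induction rows with
  | nil => intro r _; simp [solLoopR]
  | cons row rows ih =>
    intro r hdrop
    have hget : g.getD r [] = row := by
      rw [List.getD_eq_getElem?_getD]
      have h : (g.drop r)[0]? = g[r]? := by simp [List.getElem?_drop]
      rw [← h, hdrop]
      rfl
    have hdrop' : g.drop (r + 1) = rows := by
      have : g.drop (r + 1) = (g.drop r).drop 1 := by
        rw [List.drop_drop, Nat.add_comm]
      rw [this, hdrop]
      rfl
    simp only [solLoopR, List.length_cons, List.range'_succ, List.flatMap_cons]
    congr 1
    · have h0 : (0 : Int) = ((0 : Nat) : Int) := rfl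
      rw [h0, loopC_eq, hget, List.range_eq_range']
    · have : ((r : Int) + 1) = ((r + 1 : Nat) : Int) := by push_cast; ring
      rw [this, ih (r + 1) hdrop']

theorem solLoop_all (g : List (List Int)) (line t : Int) :
    solLoopR g line t g 0
      = (List.range g.length).flatMap
          (fun r => (List.range (g.getD r []).length).flatMap (cellTermB g line t r)) := by
  have h0 : (0 : Int) = ((0 : Nat) : Int) := rfl
  rw [h0, loopR_eq g line t g 0 rfl, List.range_eq_range']

-- ===== VERDICT (by name: the statement is the Claim_ definition above) =====
theorem Solution_spec : Claim_equal_Solution := by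
  intro num_rooms _ _
  unfold Spec_Solution
  show Solution num_rooms = Solution_alt num_rooms
  simp only [Solution, Solution_alt]
  rw [solLoop_all]
  rfl
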